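-- pv_equiv track=rewrite | github.com/abhirs2183-sys/Vercel_App_Test | Datafix-Assembler/sql_processor.py | extract_sql_queries
-- ===== SOURCE A (Python) =====
-- def extract_sql_queries(lines):
--     queries = []
--     current_query_lines = []
--     in_query = False
--     blank_pos_set = {-1}
--     first_query_pos = -1
--
--     metadata_prefixes = [
--         'created by', 'case#', 'case #', 'client pin', 'client name',
--         'database:'
--     ]
--
--     for i, line in enumerate(lines):
--         line_stripped = line.strip()
--         line_lower = line_stripped.lower()
--
--         if (first_query_pos == -1 and in_query):
--             first_query_pos = i - 1
--         if (line_lower == '' and first_query_pos != -1):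
--             blank_pos_set.add(i - first_query_pos)
--
--         is_metadata = any(
--             line_lower.startswith(prefix) for prefix in metadata_prefixes)
--         if is_metadata:
--             continue
--
--         if is_sql_statement_start(line_stripped):
--             if current_query_lines:
--                 query_text = '\n'.join(current_query_lines).strip()
--                 if query_text:
--                     queries.append(query_text)
--                 current_query_lines = []
--             current_query_lines.append(line_stripped)
--             in_query = True
--         elif in_query and line_stripped:
--             current_query_lines.append(line_stripped)
--
--     if current_query_lines:
--         query_text = '\n'.join(current_query_lines).strip()
--         if query_text:
--             queries.append(query_text)
--
--     return queries, blank_pos_set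
--
-- def is_sql_statement_start(line):
--     line_lower = line.lower()
--     sql_keywords = ['update ', 'delete ', 'exec ', 'execute ']
--     return any(line_lower.startswith(kw) for kw in sql_keywords)
-- ===== SOURCE B (Python) =====
-- METADATA_PREFIXES = ('created by', 'case#', 'case #', 'client pin', 'client name',
--                      'database:')
-- SQL_KEYWORDS = ('update ', 'delete ', 'exec ', 'execute ')
--
--
-- def is_sql_statement_start(line):
--     return line.lower().startswith(SQL_KEYWORDS)
--
--
-- def _is_metadata(line):
--     return line.strip().lower().startswith(METADATA_PREFIXES)
--
--
-- def _flush(queries, current):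
--     query_text = '\n'.join(current).strip()
--     if query_text:
--         queries.append(query_text)
--
--
-- def extract_sql_queries(lines):
--     # Pass 1: blank positions, relative to the first SQL-start line.
--     blank_pos_set = {-1}
--     s = next((i for i, line in enumerate(lines)
--               if not _is_metadata(line)
--               and is_sql_statement_start(line.strip())), None)
--     if s is not None:
--         for i, line in enumerate(lines):
--             if i > s and line.strip() == '':
--                 blank_pos_set.add(i - s)
--
--     # Pass 2: assemble the queries.
--     queries = []
--     current = []
--     for line in lines:
--         stripped = line.strip()
--         if _is_metadata(line):
--             continue
--         if is_sql_statement_start(stripped):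
--             if current:
--                 _flush(queries, current)
--             current = [stripped]
--         elif current and stripped:
--             current.append(stripped)
--     if current:
--         _flush(queries, current)
--
--     return queries, blank_pos_set
-- ===== Notes on version B (the rewrite author's own statement) =====
-- stated objective: alternative
-- what changed: Replaces A's single stateful loop (in_query flag, deferred first_query_pos bookkeeping, per-line generator any()s) by two independent passes: one scan finds the first SQL-start line and collects blank-line offsets relative to it, a separate scan assembles the queries keyed on the accumulator being non-empty; str.startswith on a tuple replaces the per-line any() generators.
import Mathlib
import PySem

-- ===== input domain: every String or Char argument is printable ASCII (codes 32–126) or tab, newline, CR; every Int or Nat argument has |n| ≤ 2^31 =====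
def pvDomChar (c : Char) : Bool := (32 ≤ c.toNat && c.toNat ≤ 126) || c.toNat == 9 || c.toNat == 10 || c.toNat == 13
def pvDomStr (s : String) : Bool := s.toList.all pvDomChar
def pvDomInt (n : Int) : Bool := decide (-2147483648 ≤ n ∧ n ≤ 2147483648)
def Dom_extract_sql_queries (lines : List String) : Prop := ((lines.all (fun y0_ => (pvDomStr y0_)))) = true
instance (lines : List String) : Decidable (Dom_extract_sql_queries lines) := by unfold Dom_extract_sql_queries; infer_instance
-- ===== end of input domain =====

-- B replaces A's single stateful loop by two independent passes (blank offsets found from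
-- the first SQL-start line, queries assembled keyed on a non-empty accumulator);
-- objective: alternative decomposition, same cost.

-- ===== PORT A =====
def pvMetaPrefixes : List String :=
  ["created by", "case#", "case #", "client pin", "client name", "database:"]

def is_sql_statement_start (line : String) : Bool :=
  let line_lower := PySem.Str.lower line
  ["update ", "delete ", "exec ", "execute "].any (fun kw => PySem.Str.startswith line_lower kw)

-- 'any(line_lower.startswith(prefix) for prefix in metadata_prefixes)'
def pvIsMeta (line_lower : String) : Bool :=
  pvMetaPrefixes.any (fun pre => PySem.Str.startswith line_lower pre)

-- the body of A's 'for i, line in enumerate(lines)' loop, state (queries, current_query_lines, in_query, blank_pos_set, first_query_pos)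
def pvAStep (st : List String × List String × Bool × PySem.Set Int × Int) (p : Int × String) :
    List String × List String × Bool × PySem.Set Int × Int :=
  let (queries, cur, in_query, blank, fqp) := st
  let ls := PySem.Str.strip p.2
  let ll := PySem.Str.lower ls
  let fqp := if fqp = -1 ∧ in_query = true then p.1 - 1 else fqp
  let blank := if ll = "" ∧ fqp ≠ -1 then PySem.Set.add blank (p.1 - fqp) else blank
  if pvIsMeta ll then (queries, cur, in_query, blank, fqp)
  else if is_sql_statement_start ls then
    let queries :=
      if cur ≠ [] then
        let qt := PySem.Str.strip (PySem.Str.join "\n" cur)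
        if qt ≠ "" then queries ++ [qt] else queries
      else queries
    (queries, [ls], true, blank, fqp)
  else if in_query = true ∧ ls ≠ "" then (queries, cur ++ [ls], in_query, blank, fqp)
  else (queries, cur, in_query, blank, fqp)

def extract_sql_queries (lines : List String) : List String × List Int :=
  let st := (PySem.List.enumerate lines 0).foldl pvAStep
    ([], [], false, PySem.Set.ofList [(-1 : Int)], -1)
  let (queries, cur, _, blank, _) := st
  let queries :=
    if cur ≠ [] then
      let qt := PySem.Str.strip (PySem.Str.join "\n" cur)
      if qt ≠ "" then queries ++ [qt] else queries
    else queries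
  (queries, blank)

-- ===== PORT B =====
-- Source B's _is_metadata
def pvIsMetadata (line : String) : Bool := pvIsMeta (PySem.Str.lower (PySem.Str.strip line))

-- Source B's 'next((i for i, line in enumerate(lines) if ...), None)'
def pvFindStart : List String → Int → Option Int
  | [], _ => none
  | l :: rest, i =>
    if ¬ pvIsMetadata l = true ∧ is_sql_statement_start (PySem.Str.strip l) = true then some i
    else pvFindStart rest (i + 1)

-- Source B's _flush
def pvFlush (queries current : List String) : List String :=
  let query_text := PySem.Str.strip (PySem.Str.join "\n" current)
  if query_text ≠ "" then queries ++ [query_text] else queries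

-- body of Source B's blank-collecting pass (pass 1)
def pvBBlankStep (s : Int) (bl : PySem.Set Int) (p : Int × String) : PySem.Set Int :=
  if p.1 > s ∧ PySem.Str.strip p.2 = "" then PySem.Set.add bl (p.1 - s) else bl

-- body of Source B's query-assembling pass (pass 2), state (queries, current)
def pvBStep (qc : List String × List String) (line : String) : List String × List String :=
  let (queries, current) := qc
  let stripped := PySem.Str.strip line
  if pvIsMetadata line then (queries, current)
  else if is_sql_statement_start stripped then
    ((if current ≠ [] then pvFlush queries current else queries), [stripped])
  else if current ≠ [] ∧ stripped ≠ "" then (queries, current ++ [stripped])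
  else (queries, current)

def extract_sql_queries_alt (lines : List String) : List String × List Int :=
  let blank_pos_set : PySem.Set Int :=
    match pvFindStart lines 0 with
    | none => PySem.Set.ofList [(-1 : Int)]
    | some s => (PySem.List.enumerate lines 0).foldl (pvBBlankStep s)
        (PySem.Set.ofList [(-1 : Int)])
  let qc := lines.foldl pvBStep ([], [])
  let queries := if qc.2 ≠ [] then pvFlush qc.1 qc.2 else qc.1
  (queries, blank_pos_set)

-- ===== PRECONDITION & SPEC =====
def Spec_extract_sql_queries (lines : List String) (out : List String × List Int) : Prop := out = extract_sql_queries_alt lines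
instance (lines : List String) (out : List String × List Int) : Decidable (Spec_extract_sql_queries lines out) := by unfold Spec_extract_sql_queries; infer_instance

-- ===== CLAIM (what is proved, stated in full; the proofs are below) =====
def Claim_equal_extract_sql_queries : Prop := ∀ (lines : List String), Dom_extract_sql_queries lines → Spec_extract_sql_queries lines (extract_sql_queries lines)

-- ===== LEMMAS AND PROOFS =====

-- the blank_pos_set/first_query_pos/in_query part of A's loop body, in isolation
def pvBlankStep (st : PySem.Set Int × Int × Bool) (p : Int × String) : PySem.Set Int × Int × Bool :=
  let (blank, fqp, inq) := st
  let ls := PySem.Str.strip p.2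
  let ll := PySem.Str.lower ls
  let fqp := if fqp = -1 ∧ inq = true then p.1 - 1 else fqp
  let blank := if ll = "" ∧ fqp ≠ -1 then PySem.Set.add blank (p.1 - fqp) else blank
  let inq := if ¬ pvIsMeta ll = true ∧ is_sql_statement_start ls = true then true else inq
  (blank, fqp, inq)

lemma pv_lower_empty_iff (s : String) : PySem.Str.lower s = "" ↔ s = "" := by
  rw [← String.toList_inj]; simp [PySem.Chars.lower]

-- one step of A's loop = one step of B's query pass paired with one step of the isolated blank fold
lemma pv_step_eq (p : Int × String) (q c : List String) (inq : Bool)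
    (bl : PySem.Set Int) (fqp : Int) (hc : inq = true ↔ c ≠ []) :
    pvAStep (q, c, inq, bl, fqp) p =
      ((pvBStep (q, c) p.2).1, (pvBStep (q, c) p.2).2,
       (pvBlankStep (bl, fqp, inq) p).2.2, (pvBlankStep (bl, fqp, inq) p).1,
       (pvBlankStep (bl, fqp, inq) p).2.1) := by
  simp only [pvAStep, pvBStep, pvBlankStep, pvIsMetadata]
  split_ifs <;> simp_all [pvFlush]

-- the invariant 'in_query ↔ current_query_lines ≠ []' is preserved by one step
lemma pv_step_inv (p : Int × String) (q c : List String) (inq : Bool)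
    (bl : PySem.Set Int) (fqp : Int) (hc : inq = true ↔ c ≠ []) :
    (pvBlankStep (bl, fqp, inq) p).2.2 = true ↔ (pvBStep (q, c) p.2).2 ≠ [] := by
  simp only [pvBStep, pvBlankStep, pvIsMetadata]
  split_ifs <;> simp_all

-- A's fold factors into B's query fold and the isolated blank fold
lemma pv_factor (l : List String) (i : Int) (q c : List String) (inq : Bool)
    (bl : PySem.Set Int) (fqp : Int) (hc : inq = true ↔ c ≠ []) :
    (PySem.List.enumerate l i).foldl pvAStep (q, c, inq, bl, fqp) =
      ((l.foldl pvBStep (q, c)).1, (l.foldl pvBStep (q, c)).2,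
       ((PySem.List.enumerate l i).foldl pvBlankStep (bl, fqp, inq)).2.2,
       ((PySem.List.enumerate l i).foldl pvBlankStep (bl, fqp, inq)).1,
       ((PySem.List.enumerate l i).foldl pvBlankStep (bl, fqp, inq)).2.1) := by
  induction l generalizing i q c inq bl fqp with
  | nil => simp [PySem.List.enumerate_nil]
  | cons x l ih =>
    rw [PySem.List.enumerate_cons]
    simp only [List.foldl_cons]
    rw [pv_step_eq (i, x) q c inq bl fqp hc]
    have hc' := pv_step_inv (i, x) q c inq bl fqp hc
    rw [ih (i+1) _ _ _ _ _ hc']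

lemma pv_findStart_ge (l : List String) (i s : Int) (h : pvFindStart l i = some s) : i ≤ s := by
  induction l generalizing i with
  | nil => simp [pvFindStart] at h
  | cons x l ih =>
    unfold pvFindStart at h
    split at h
    · simp at h; omega
    · have := ih (i+1) h; omega

-- after first_query_pos is pinned to s, A's blank updates are exactly B's pass-1 step
lemma pv_blank3 (l : List String) (i : Int) (bl : PySem.Set Int) (s : Int)
    (h0 : 0 ≤ s) (h1 : s < i) :
    ((PySem.List.enumerate l i).foldl pvBlankStep (bl, s, true)).1 =
      (PySem.List.enumerate l i).foldl (pvBBlankStep s) bl := by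
  induction l generalizing i bl with
  | nil => simp [PySem.List.enumerate_nil]
  | cons x l ih =>
    rw [PySem.List.enumerate_cons]
    simp only [List.foldl_cons]
    have hs : ¬ (s = -1) := by omega
    have hstep : pvBlankStep (bl, s, true) (i, x) = (pvBBlankStep s bl (i, x), s, true) := by
      simp only [pvBlankStep, pvBBlankStep, hs]
      simp [pv_lower_empty_iff, h1, hs]
    rw [hstep, ih (i+1) _ (by omega)]

-- the iteration right after in_query turned true pins first_query_pos to i - 1
lemma pv_blank2 (l : List String) (i : Int) (bl : PySem.Set Int) (h : 1 ≤ i) :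
    ((PySem.List.enumerate l i).foldl pvBlankStep (bl, -1, true)).1 =
      (PySem.List.enumerate l i).foldl (pvBBlankStep (i - 1)) bl := by
  cases l with
  | nil => simp [PySem.List.enumerate_nil]
  | cons x l =>
    rw [PySem.List.enumerate_cons]
    simp only [List.foldl_cons]
    have hstep : pvBlankStep (bl, -1, true) (i, x) = (pvBBlankStep (i-1) bl (i, x), i - 1, true) := by
      simp only [pvBlankStep, pvBBlankStep]
      have h1 : ¬ (i - 1 = -1) := by omega
      simp [pv_lower_empty_iff, h1, show i - 1 < i by omega]
    rw [hstep, pv_blank3 l (i+1) _ (i-1) (by omega) (by omega)]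

-- A's blank fold from the initial state computes B's pass 1 (keyed by the first SQL-start position)
lemma pv_blank1 (l : List String) (i : Int) (bl : PySem.Set Int) (h : 0 ≤ i) :
    ((PySem.List.enumerate l i).foldl pvBlankStep (bl, -1, false)).1 =
      (match pvFindStart l i with
       | none => bl
       | some s => (PySem.List.enumerate l i).foldl (pvBBlankStep s) bl) := by
  induction l generalizing i bl with
  | nil => simp [PySem.List.enumerate_nil, pvFindStart]
  | cons x l ih =>
    rw [PySem.List.enumerate_cons]
    simp only [List.foldl_cons]
    unfold pvFindStart
    by_cases hst : ¬ pvIsMetadata x = true ∧ is_sql_statement_start (PySem.Str.strip x) = true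
    · simp only [hst]
      have hstep : pvBlankStep (bl, -1, false) (i, x) = (bl, -1, true) := by
        simp only [pvBlankStep]
        simp only [pvIsMetadata] at hst
        simp [hst.1, hst.2]
      rw [hstep, pv_blank2 l (i+1) bl (by omega)]
      simp [pvBBlankStep, show i + 1 - 1 = i by omega]
    · simp only [hst, if_neg, not_false_eq_true]
      have hstep : pvBlankStep (bl, -1, false) (i, x) = (bl, -1, false) := by
        simp only [pvBlankStep, pvIsMetadata] at hst ⊢
        simp
        intro hm
        rcases (not_and_or.mp hst) with h1 | h2
        · simp [hm] at h1
        · simpa using h2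
      rw [hstep, ih (i+1) bl (by omega)]
      cases hfs : pvFindStart l (i+1) with
      | none => simp
      | some s =>
        have hge := pv_findStart_ge l (i+1) s hfs
        simp only []
        rw [show pvBBlankStep s bl (i, x) = bl by simp [pvBBlankStep]; omega]

-- ===== VERDICT (by name: the statement is the Claim_ definition above) =====
theorem extract_sql_queries_spec : Claim_equal_extract_sql_queries := by
  intro lines _
  show _ = _
  unfold extract_sql_queries extract_sql_queries_alt
  rw [pv_factor lines 0 [] [] false (PySem.Set.ofList [(-1 : Int)]) (-1) (by simp)]
  rw [pv_blank1 lines 0 _ (by norm_num)]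
  rfl
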